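-- pv_equiv track=rewrite | github.com/Billith/Academic | MIW/Projekt3/solv.py | calculateChooicesPlayerForOneTarget
-- ===== SOURCE A (Python) =====
-- def calculateChooicesPlayerForOneTarget(target,array):
--     count = 0;
--     rock = 0;
--     paper = 0;
--     scizor = 0;
--     for i,move in enumerate(array):
--         if (len(array) - 1) != i:
--             if move == target:
--                 count = count + 1;
--                 #Kamien po targecie
--                 if array[i+1] == 'K':
--                     rock = rock + 1
--                 #Papier po targecie
--                 if array[i + 1] == 'P':
--                     paper = paper + 1
--                 #Nozyce po targecie
--                 if array[i + 1] == 'N':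
--                     scizor = scizor + 1
--
--     return rock, paper, scizor, count
-- ===== SOURCE B (Python) =====
-- def calculateChooicesPlayerForOneTarget(target, array):
--     # Frequency table of ALL adjacent bigrams, built once; answers are lookups.
--     bigrams = {}
--     for pair in zip(array, array[1:]):
--         bigrams[pair] = bigrams.get(pair, 0) + 1
--     return (bigrams.get((target, 'K'), 0),
--             bigrams.get((target, 'P'), 0),
--             bigrams.get((target, 'N'), 0),
--             array[:-1].count(target))
-- ===== Notes on version B (the rewrite author's own statement) =====
-- stated objective: alternative
-- what changed: B builds a frequency table of ALL adjacent bigrams once (a dict keyed by (cur,next) pairs, no filtering on target during the pass) and then answers by three table lookups bigrams[(target,'K'/'P'/'N')], with the occurrence count read off independently as array[:-1].count(target); A instead filters on target inside one indexed loop and maintains four parallel branch-incremented counters.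
import Mathlib
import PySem

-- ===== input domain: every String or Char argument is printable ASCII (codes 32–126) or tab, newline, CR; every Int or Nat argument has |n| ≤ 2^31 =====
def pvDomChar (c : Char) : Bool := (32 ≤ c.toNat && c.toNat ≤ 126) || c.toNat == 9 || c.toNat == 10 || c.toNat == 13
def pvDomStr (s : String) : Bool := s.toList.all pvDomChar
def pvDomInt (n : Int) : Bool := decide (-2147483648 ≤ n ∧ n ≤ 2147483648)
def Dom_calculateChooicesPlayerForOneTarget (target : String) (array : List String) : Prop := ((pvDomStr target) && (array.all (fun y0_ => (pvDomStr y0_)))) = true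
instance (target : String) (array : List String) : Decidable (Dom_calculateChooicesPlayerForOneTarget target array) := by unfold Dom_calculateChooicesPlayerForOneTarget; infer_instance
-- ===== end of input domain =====

-- B builds a frequency table of ALL adjacent bigrams once (dict keyed by (cur,next)) and
-- answers by table lookups plus array[:-1].count(target), replacing A's target-filtered
-- loop with four parallel counters; objective: alternative (same linear cost).

-- ===== PORT A =====
-- one loop iteration of A: state is (count, rock, paper, scizor)
def pvStepA (target : String) (array : List String) (s : Int × Int × Int × Int) (p : Int × String) : Int × Int × Int × Int :=
  if ((array.length : Int) - 1) ≠ p.1 then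
    if p.2 == target then
      let count := s.1 + 1
      let nxt := PySem.List.pyGet? array (p.1 + 1)   -- in range under the guard i ≠ len-1 for i < len
      let rock := if nxt = some "K" then s.2.1 + 1 else s.2.1
      let paper := if nxt = some "P" then s.2.2.1 + 1 else s.2.2.1
      let scizor := if nxt = some "N" then s.2.2.2 + 1 else s.2.2.2
      (count, rock, paper, scizor)
    else s
  else s

def calculateChooicesPlayerForOneTarget (target : String) (array : List String) : Int × Int × Int × Int :=
  let st := (PySem.List.enumerate array).foldl (pvStepA target array) (0, 0, 0, 0)
  (st.2.1, st.2.2.1, st.2.2.2, st.1)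

-- ===== PORT B =====
-- bigrams = {}; for pair in zip(array, array[1:]): bigrams[pair] = bigrams.get(pair, 0) + 1
def pvBigrams (target : String) (array : List String) : PySem.Dict (String × String) Int :=
  (array.zip (PySem.List.slice array (some 1) none)).foldl
    (fun d p => d.insert p (d.getD p 0 + 1)) PySem.Dict.empty

def calculateChooicesPlayerForOneTarget_alt (target : String) (array : List String) : Int × Int × Int × Int :=
  let bigrams := pvBigrams target array
  (bigrams.getD (target, "K") 0, bigrams.getD (target, "P") 0, bigrams.getD (target, "N") 0,
   (PySem.List.count (PySem.List.slice array none (some (-1))) target : Int))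

-- ===== PRECONDITION & SPEC =====
def Spec_calculateChooicesPlayerForOneTarget (target : String) (array : List String) (out : Int × Int × Int × Int) : Prop := out = calculateChooicesPlayerForOneTarget_alt target array
instance (target : String) (array : List String) (out : Int × Int × Int × Int) : Decidable (Spec_calculateChooicesPlayerForOneTarget target array out) := by unfold Spec_calculateChooicesPlayerForOneTarget; infer_instance

-- ===== CLAIM (what is proved, stated in full; the proofs are below) =====
def Claim_equal_calculateChooicesPlayerForOneTarget : Prop := ∀ (target : String) (array : List String), Dom_calculateChooicesPlayerForOneTarget target array → Spec_calculateChooicesPlayerForOneTarget target array (calculateChooicesPlayerForOneTarget target array)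

-- ===== LEMMAS AND PROOFS =====

-- proof-side helper: the successors of the occurrences of target
def pvSuccs (target : String) (array : List String) : List String :=
  (array.zip (array.drop 1)).filterMap (fun p => if p.1 == target then some p.2 else none)

-- Peeling one occurrence off the successor list.
theorem pvSuccs_cons (target x y : String) (yt : List String) :
    pvSuccs target (x :: y :: yt) =
      (if x == target then [y] else []) ++ pvSuccs target (y :: yt) := by
  by_cases h : x = target <;> simp [pvSuccs, h]

-- Main invariant for A: the fold over the enumeration of the suffix `xs` of `array`
-- (starting at index `pre.length`) adds exactly the statistics of pvSuccs of that suffix.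
theorem pvFold_eq (target : String) (array pre xs : List String)
    (h : array = pre ++ xs) (acc : Int × Int × Int × Int) :
    (PySem.List.enumerate xs (pre.length : Int)).foldl (pvStepA target array) acc =
      (acc.1 + ((pvSuccs target xs).length : Int),
       acc.2.1 + (PySem.List.count (pvSuccs target xs) "K" : Int),
       acc.2.2.1 + (PySem.List.count (pvSuccs target xs) "P" : Int),
       acc.2.2.2 + (PySem.List.count (pvSuccs target xs) "N" : Int)) := by
  induction xs generalizing pre acc with
  | nil => simp [PySem.List.enumerate_nil, pvSuccs, PySem.List.count]
  | cons x xt ih =>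
    rw [PySem.List.enumerate_cons]
    cases xt with
    | nil =>
      have hg : ((array.length : Int) - 1) = (pre.length : Int) := by
        subst h; simp
      simp [List.foldl, pvStepA, hg, PySem.List.enumerate_nil, pvSuccs, PySem.List.count]
    | cons y yt =>
      have hg : ((array.length : Int) - 1) ≠ (pre.length : Int) := by
        subst h; simp; omega
      have hget : PySem.List.pyGet? array ((pre.length : Int) + 1) = some y := by
        have : array = (pre ++ [x]) ++ y :: yt := by simp [h]
        rw [this]
        have := PySem.List.pyGet?_append_length (pre ++ [x]) yt y
        simpa using this
      have hlen : ((pre.length : Int) + 1) = ((pre ++ [x]).length : Int) := by simp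
      have hrec := ih (pre ++ [x]) (by simp [h])
      simp only [List.foldl, pvStepA, hget]
      rw [pvSuccs_cons]
      by_cases ht : x == target
      · simp only [ht, if_true, if_pos hg, List.singleton_append]
        rw [hlen, hrec]
        simp only [Prod.ext_iff, PySem.List.count_eq, List.count_cons, List.length_cons]
        by_cases hK : y = "K" <;> by_cases hP : y = "P" <;> by_cases hN : y = "N" <;>
          simp [hK, hP, hN] <;> omega
      · simp only [ht, Bool.false_eq_true, if_false, ite_self, List.nil_append]
        rw [hlen, hrec]

-- B side: the count of a bigram (t, c) in a pair list is the count of c among the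
-- successors that the filterMap extracts.
theorem pvPairCount (t c : String) (l : List (String × String)) :
    l.count (t, c) =
      (l.filterMap (fun p => if p.1 == t then some p.2 else none)).count c := by
  induction l with
  | nil => simp
  | cons p l ih =>
    obtain ⟨a, b⟩ := p
    by_cases ha : a = t
    · subst ha
      by_cases hb : b = c <;> simp [List.count_cons, hb, ih, Prod.ext_iff]
    · simp [List.count_cons, ha, ih, Prod.ext_iff]

-- B side: the length of the successor list is the number of occurrences of target
-- among all but the last element.
theorem pvLen (t : String) (array : List String) :
    (pvSuccs t array).length = array.dropLast.count t := by
  induction array with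
  | nil => simp [pvSuccs]
  | cons x xt ih =>
    cases xt with
    | nil => simp [pvSuccs]
    | cons y yt =>
      rw [pvSuccs_cons]
      by_cases h : x = t <;>
        simp [h, ih]

-- ===== VERDICT (by name: the statement is the Claim_ definition above) =====
theorem calculateChooicesPlayerForOneTarget_spec : Claim_equal_calculateChooicesPlayerForOneTarget := by
  intro target array _
  unfold Spec_calculateChooicesPlayerForOneTarget
  unfold calculateChooicesPlayerForOneTarget calculateChooicesPlayerForOneTarget_alt pvBigrams
  have hA := pvFold_eq target array [] array (by simp) (0, 0, 0, 0)
  simp only [List.length_nil, Nat.cast_zero] at hA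
  rw [show (PySem.List.enumerate array) = (PySem.List.enumerate array (0 : Int)) from rfl, hA]
  rw [PySem.List.slice_from_one, PySem.List.slice_to_neg_one]
  have htail : array.tail = array.drop 1 := by simp
  rw [htail]
  simp only [PySem.Dict.getD_foldl_insert_add_one, PySem.List.count_eq]
  rw [pvPairCount target "K", pvPairCount target "P", pvPairCount target "N", pvLen]
  simp [pvSuccs]
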